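-- pv_equiv track=rewrite | github.com/eonstoeons/Mazfall-Infinite | MAZFALL_INF.py | gen_chunk
-- ===== SOURCE A (Python) =====
-- class L:
--     A=1664525;C=1013904223;M=1<<32
--     def __init__(s,v=0):s.v=v&0xFFFFFFFF
--     def n(s):s.v=(s.A*s.v+s.C)%s.M;return s.v
--     def r(s):return s.n()/s.M
--     def i(s,a,b):return a+int(s.r()*(b-a+1))
--
-- CSIZ  = 23       # chunk cell size (odd)
--
-- CMID  = 11       # CSIZ//2 — edge passage position (odd ✓)
--
-- def cseed(ws,cx,cy):
--     v=ws^(cx*1664525+1013904223)^(cy*22695477+1)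
--     return(v*2654435761)&0xFFFFFFFF
--
-- def gen_chunk(ws,cx,cy):
--     G=CSIZ;lcg=L(cseed(ws,cx,cy))
--     M=[[1]*G for _ in range(G)]
--     # force outer edge mid-passages (inter-chunk bridge cells)
--     M[0][CMID]=M[G-1][CMID]=M[CMID][0]=M[CMID][G-1]=0
--     # iterative DFS — fisher-yates lcg shuffle per cell
--     DB=[(0,-2),(0,2),(-2,0),(2,0)]
--     def sd():
--         d=list(DB)
--         for i in range(3,0,-1):j=lcg.i(0,i);d[i],d[j]=d[j],d[i]
--         return d
--     M[1][1]=0;stk=[(1,1,sd())]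
--     while stk:
--         x,y,ds=stk[-1]
--         if not ds:stk.pop();continue
--         dx,dy=ds.pop(0);nx,ny=x+dx,y+dy
--         if 1<=nx<G-1 and 1<=ny<G-1 and M[ny][nx]:
--             M[y+dy//2][x+dx//2]=0;M[ny][nx]=0;stk.append((nx,ny,sd()))
--     # DFS visits all odd cells: (1,1)…(21,21) — CMID=11 (odd) guaranteed visited ✓
--     # So M[1][11] M[21][11] M[11][1] M[11][21] all opened by DFS
--     return M
-- ===== SOURCE B (Python) =====
-- # B: same maze generation, but the explicit-stack DFS is replaced by a recursive carve(x,y)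
-- class L:
--     A=1664525;C=1013904223;M=1<<32
--     def __init__(s,v=0):s.v=v&0xFFFFFFFF
--     def n(s):s.v=(s.A*s.v+s.C)%s.M;return s.v
--     def r(s):return s.n()/s.M
--     def i(s,a,b):return a+int(s.r()*(b-a+1))
--
-- CSIZ=23
-- CMID=11
--
-- def cseed(ws,cx,cy):
--     v=ws^(cx*1664525+1013904223)^(cy*22695477+1)
--     return(v*2654435761)&0xFFFFFFFF
--
-- def gen_chunk(ws,cx,cy):
--     G=CSIZ
--     lcg=L(cseed(ws,cx,cy))
--     M=[[1]*G for _ in range(G)]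
--     M[0][CMID]=M[G-1][CMID]=M[CMID][0]=M[CMID][G-1]=0
--     DB=[(0,-2),(0,2),(-2,0),(2,0)]
--     def sd():
--         d=list(DB)
--         for i in range(3,0,-1):
--             j=lcg.i(0,i);d[i],d[j]=d[j],d[i]
--         return d
--     def carve(x,y):
--         for dx,dy in sd():
--             nx,ny=x+dx,y+dy
--             if 1<=nx<G-1 and 1<=ny<G-1 and M[ny][nx]:
--                 M[y+dy//2][x+dx//2]=0
--                 M[ny][nx]=0
--                 carve(nx,ny)
--     M[1][1]=0
--     carve(1,1)
--     return M
-- ===== Notes on version B (the rewrite author's own statement) =====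
-- stated objective: simpler
-- what changed: The explicit-stack DFS with per-frame pending-direction lists is replaced by a plain recursive carve(x,y) helper that shuffles once on entry and recurses into freshly carved neighbours, preserving the exact LCG draw order.
import Mathlib
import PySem

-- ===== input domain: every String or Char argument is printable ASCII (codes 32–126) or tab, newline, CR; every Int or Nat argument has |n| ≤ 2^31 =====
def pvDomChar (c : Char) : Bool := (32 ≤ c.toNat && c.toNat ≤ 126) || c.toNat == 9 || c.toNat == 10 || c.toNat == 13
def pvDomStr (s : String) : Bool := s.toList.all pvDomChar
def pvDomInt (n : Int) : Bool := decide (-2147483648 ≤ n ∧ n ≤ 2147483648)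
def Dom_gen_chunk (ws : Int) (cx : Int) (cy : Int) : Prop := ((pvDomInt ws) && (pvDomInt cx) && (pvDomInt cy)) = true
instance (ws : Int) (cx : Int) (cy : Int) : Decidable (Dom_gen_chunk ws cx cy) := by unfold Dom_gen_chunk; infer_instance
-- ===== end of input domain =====

-- B replaces A's explicit-stack DFS by a recursive carve helper (same seeded shuffles, same maze); objective: simpler.

-- ===== shared module context (class L, cseed, the grid cells — identical in Source A and Source B) =====

-- class L: n(): v = (A*v+C) % 2^32
def lcgN (v : Nat) : Nat := (1664525 * v + 1013904223) % 4294967296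
-- cseed: Python int xor/and via PySem bitwise (exact on negatives)
def cseedL (ws cx cy : Int) : Nat :=
  (PySem.Int.band
    (PySem.Int.bxor (PySem.Int.bxor ws (cx * 1664525 + 1013904223)) (cy * 22695477 + 1) * 2654435761)
    4294967295).toNat

-- cell read / write M[y][x]; getD/set are exact here: every index used is in range of the 23×23 grid
def gget (M : List (List Int)) (y x : Nat) : Int := (M.getD y []).getD x 0
def gset (M : List (List Int)) (y x : Nat) (v : Int) : List (List Int) :=
  M.set y ((M.getD y []).set x v)

-- d[i],d[j] = d[j],d[i]
def gswap (d : List (Int × Int)) (i j : Nat) : List (Int × Int) :=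
  let di := d.getD i (0, 0)
  let dj := d.getD j (0, 0)
  (d.set i dj).set j di

def pvDB : List (Int × Int) := [(0, -2), (0, 2), (-2, 0), (2, 0)]

-- sd(): Fisher–Yates over DB for i = 3,2,1, threading the LCG state; returns (shuffled list, new state).
-- Each draw j = lcg.i(0,i) = int(n()/2^32*(i+1)) = (new state * (i+1)) / 2^32, exact:
-- state*(i+1) < 2^34 < 2^53 is float-exact and /2^32 is a power of two.
def sd (v : Nat) : List (Int × Int) × Nat :=
  (gswap (gswap (gswap pvDB 3 ((lcgN v * 4) / 4294967296))
                2 ((lcgN (lcgN v) * 3) / 4294967296))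
         1 ((lcgN (lcgN (lcgN v)) * 2) / 4294967296),
   lcgN (lcgN (lcgN v)))

-- number of still-wall (nonzero) cells: the termination measure of the DFS
def walls (M : List (List Int)) : Nat :=
  (M.map (fun r => r.countP (fun c => c != 0))).sum

-- termination facts (stated before the ports because their decreasing_by cite them)
theorem countP_set_zero_le (l : List Int) (i : Nat) :
    (l.set i 0).countP (fun c => c != 0) ≤ l.countP (fun c => c != 0) := by
  induction l generalizing i with
  | nil => simp
  | cons a t ih =>
      cases i with
      | zero => simp [List.countP_cons]
      | succ j => simpa [List.countP_cons] using ih j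

theorem countP_set_zero_lt (l : List Int) (i : Nat) (h : l.getD i 0 ≠ 0) :
    (l.set i 0).countP (fun c => c != 0) < l.countP (fun c => c != 0) := by
  induction l generalizing i with
  | nil => simp [List.getD] at h
  | cons a t ih =>
      cases i with
      | zero =>
          simp [List.getD] at h
          simp [h]
      | succ j =>
          simp [List.getD] at h
          have := ih j (by simpa [List.getD] using h)
          simp [List.countP_cons]
          omega

theorem walls_gset_le (M : List (List Int)) (y x : Nat) : walls (gset M y x 0) ≤ walls M := by
  induction M generalizing y with
  | nil => simp [walls, gset]
  | cons r t ih =>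
      cases y with
      | zero =>
          simp [walls, gset, List.getD]
          exact countP_set_zero_le r x
      | succ z =>
          have := ih z
          simpa [walls, gset, List.getD] using this

theorem walls_gset_lt (M : List (List Int)) (y x : Nat) (h : gget M y x ≠ 0) :
    walls (gset M y x 0) < walls M := by
  induction M generalizing y with
  | nil => simp [gget, List.getD] at h
  | cons r t ih =>
      cases y with
      | zero =>
          simp [gget, List.getD] at h
          simp [walls, gset, List.getD]
          have := countP_set_zero_lt r x (by simpa [List.getD] using h)
          omega
      | succ z =>
          have := ih z (by simpa [gget, List.getD] using h)
          simp [walls, gset, List.getD] at this ⊢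
          omega

theorem gget_gset_ne (M : List (List Int)) (y x y' x' : Nat) (v : Int)
    (h : (y, x) ≠ (y', x')) : gget (gset M y' x' v) y x = gget M y x := by
  unfold gget gset
  simp only [List.getD_eq_getElem?_getD]
  by_cases hy : y = y'
  · subst hy
    have hx : x ≠ x' := fun hx => h (by rw [hx])
    by_cases hl : y < M.length
    · rw [List.getElem?_set_self hl]
      simp only [Option.getD_some]
      rw [List.getElem?_set_ne (Ne.symm hx)]
    · rw [List.set_eq_of_length_le (Nat.le_of_not_lt hl)]
  · rw [List.getElem?_set_ne (Ne.symm hy)]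

-- carving the midpoint then a neighbour that was a wall strictly decreases the wall count
theorem walls_carve_lt (M : List (List Int)) (my mx ny nx : Nat)
    (h : gget M ny nx ≠ 0) :
    walls (gset (gset M my mx 0) ny nx 0) < walls M := by
  by_cases hc : (ny, nx) = (my, mx)
  · rw [Prod.mk.injEq] at hc
    obtain ⟨e1, e2⟩ := hc
    subst e1; subst e2
    exact lt_of_le_of_lt (walls_gset_le _ _ _) (walls_gset_lt M ny nx h)
  · have h0 : gget (gset M my mx 0) ny nx ≠ 0 := by
      rwa [gget_gset_ne M ny nx my mx 0 hc]
    exact lt_of_lt_of_le (walls_gset_lt _ _ _ h0) (walls_gset_le M my mx)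

theorem gswap_len (d : List (Int × Int)) (i j : Nat) : (gswap d i j).length = d.length := by
  simp [gswap]

theorem sd_len (v : Nat) : (sd v).1.length = 4 := by
  simp [sd, gswap_len, pvDB]

-- initial grid of both ports: all walls, the four forced edge mid-passages, and M[1][1]=0
def pvM2 : List (List Int) :=
  gset (gset (gset (gset (gset (List.replicate 23 (List.replicate 23 (1 : Int)))
    0 11 0) 22 11 0) 11 0 0) 11 22 0) 1 1 0

-- ===== PORT A =====
-- A's iterative DFS: stack of (x, y, pending shuffled directions); top frame pops one direction per step
def loopA (M : List (List Int)) (v : Nat) (stk : List (Int × Int × List (Int × Int))) :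
    List (List Int) :=
  match stk with
  | [] => M
  | (x, y, ds) :: rest =>
    match ds with
    | [] => loopA M v rest
    | (dx, dy) :: ds' =>
      let nx := x + dx
      let ny := y + dy
      if h : 1 ≤ nx ∧ nx < 22 ∧ 1 ≤ ny ∧ ny < 22 ∧ gget M ny.toNat nx.toNat ≠ 0 then
        let M2 := gset (gset M (y + PySem.Int.floordiv dy 2).toNat
                               (x + PySem.Int.floordiv dx 2).toNat 0) ny.toNat nx.toNat 0
        let p := sd v
        loopA M2 p.2 ((nx, ny, p.1) :: (x, y, ds') :: rest)
      else loopA M v ((x, y, ds') :: rest)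
termination_by 5 * walls M + (stk.map (fun f => f.2.2.length)).sum + stk.length
decreasing_by
  · simp
  · have hlt : walls (gset (gset M (y + PySem.Int.floordiv dy 2).toNat
        (x + PySem.Int.floordiv dx 2).toNat 0) (y + dy).toNat (x + dx).toNat 0) < walls M :=
      walls_carve_lt _ _ _ _ _ h.2.2.2.2
    simp only [List.map_cons, List.sum_cons, List.length_cons, sd_len]
    omega
  · simp

def gen_chunk (ws : Int) (cx : Int) (cy : Int) : List (List Int) :=
  loopA pvM2 (sd (cseedL ws cx cy)).2 [((1 : Int), (1 : Int), (sd (cseedL ws cx cy)).1)]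

-- ===== PORT B =====
-- B's recursive carve(x,y) = "shuffle, then loop over the shuffled directions, recursing into
-- freshly carved neighbours" (the child's sd() step appears inlined at the call site).
-- fuel only makes the structural recursion total; it is a guard, never reached with the fuel
-- passed by gen_chunk_alt (see carveB_fuel_bridge / gen_chunk_eq below).
def carveB (fuel : Nat) (M : List (List Int)) (v : Nat) (x y : Int) (ds : List (Int × Int)) :
    List (List Int) × Nat :=
  match fuel with
  | 0 => (M, v)
  | fuel + 1 =>
    match ds with
    | [] => (M, v)
    | (dx, dy) :: ds' =>
      let nx := x + dx
      let ny := y + dy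
      if 1 ≤ nx ∧ nx < 22 ∧ 1 ≤ ny ∧ ny < 22 ∧ gget M ny.toNat nx.toNat ≠ 0 then
        let M2 := gset (gset M (y + PySem.Int.floordiv dy 2).toNat
                               (x + PySem.Int.floordiv dx 2).toNat 0) ny.toNat nx.toNat 0
        let p := sd v
        let r1 := carveB fuel M2 p.2 nx ny p.1
        carveB fuel r1.1 r1.2 x y ds'
      else carveB fuel M v x y ds'

-- run the DFS and return the carved grid (first component of the threaded (grid, lcg) state)
def carveRun (fuel : Nat) (M : List (List Int)) (v : Nat) (x y : Int) (ds : List (Int × Int)) :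
    List (List Int) :=
  (carveB fuel M v x y ds).1

def gen_chunk_alt (ws : Int) (cx : Int) (cy : Int) : List (List Int) :=
  carveRun 3000 pvM2 (sd (cseedL ws cx cy)).2 1 1 (sd (cseedL ws cx cy)).1

-- ===== PRECONDITION & SPEC =====
def Spec_gen_chunk (ws : Int) (cx : Int) (cy : Int) (out : List (List Int)) : Prop := out = gen_chunk_alt ws cx cy
instance (ws : Int) (cx : Int) (cy : Int) (out : List (List Int)) : Decidable (Spec_gen_chunk ws cx cy out) := by unfold Spec_gen_chunk; infer_instance

-- ===== CLAIM (what is proved, stated in full; the proofs are below) =====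
def Claim_equal_gen_chunk : Prop := ∀ (ws : Int) (cx : Int) (cy : Int), Dom_gen_chunk ws cx cy → Spec_gen_chunk ws cx cy (gen_chunk ws cx cy)

-- ===== LEMMAS AND PROOFS =====

theorem loopA_nil (M : List (List Int)) (v : Nat) : loopA M v [] = M := by
  rw [loopA]

-- carving never creates walls
theorem carveB_walls_le (fuel : Nat) :
    ∀ (M : List (List Int)) (v : Nat) (x y : Int) (ds : List (Int × Int)),
      walls (carveB fuel M v x y ds).1 ≤ walls M := by
  induction fuel with
  | zero => intro M v x y ds; simp [carveB]
  | succ n ih =>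
    intro M v x y ds
    cases ds with
    | nil => simp [carveB]
    | cons d ds' =>
      obtain ⟨dx, dy⟩ := d
      simp only [carveB]
      split_ifs with h
      · exact le_trans (ih _ _ _ _ _)
          (le_trans (ih _ _ _ _ _) (le_of_lt (walls_carve_lt M _ _ _ _ h.2.2.2.2)))
      · exact ih _ _ _ _ _

-- the key bridge: one step of A's stack loop on a frame equals B's carve of that frame (with
-- enough fuel), then the loop on the remaining stack
theorem carveB_fuel_bridge (fuel : Nat) :
    ∀ (M : List (List Int)) (v : Nat) (x y : Int) (ds : List (Int × Int))
      (rest : List (Int × Int × List (Int × Int))),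
      5 * walls M + ds.length < fuel →
      loopA M v ((x, y, ds) :: rest) =
        loopA (carveB fuel M v x y ds).1 (carveB fuel M v x y ds).2 rest := by
  induction fuel with
  | zero => intro M v x y ds rest h; exact absurd h (Nat.not_lt_zero _)
  | succ n ih =>
    intro M v x y ds rest h
    cases ds with
    | nil =>
      rw [loopA]
      simp [carveB]
    | cons d ds' =>
      obtain ⟨dx, dy⟩ := d
      by_cases hc : 1 ≤ x + dx ∧ x + dx < 22 ∧ 1 ≤ y + dy ∧ y + dy < 22 ∧
          gget M (y + dy).toNat (x + dx).toNat ≠ 0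
      · have hlt : walls (gset (gset M (y + PySem.Int.floordiv dy 2).toNat
            (x + PySem.Int.floordiv dx 2).toNat 0) (y + dy).toNat (x + dx).toNat 0) < walls M :=
          walls_carve_lt _ _ _ _ _ hc.2.2.2.2
        have h4 := sd_len v
        have hle := carveB_walls_le n
          (gset (gset M (y + PySem.Int.floordiv dy 2).toNat
            (x + PySem.Int.floordiv dx 2).toNat 0) (y + dy).toNat (x + dx).toNat 0)
          (sd v).2 (x + dx) (y + dy) (sd v).1
        simp only [List.length_cons] at h
        rw [loopA]
        simp only [carveB]
        rw [dif_pos hc, if_pos hc]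
        have h1 : 5 * walls (gset (gset M (y + PySem.Int.floordiv dy 2).toNat
            (x + PySem.Int.floordiv dx 2).toNat 0) (y + dy).toNat (x + dx).toNat 0) +
            (sd v).1.length < n := by omega
        rw [ih _ _ _ _ _ _ h1]
        have h2 : 5 * walls (carveB n (gset (gset M (y + PySem.Int.floordiv dy 2).toNat
            (x + PySem.Int.floordiv dx 2).toNat 0) (y + dy).toNat (x + dx).toNat 0)
            (sd v).2 (x + dx) (y + dy) (sd v).1).1 + ds'.length < n := by omega
        rw [ih _ _ _ _ _ _ h2]
      · simp only [List.length_cons] at h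
        rw [loopA]
        simp only [carveB]
        rw [dif_neg hc, if_neg hc]
        exact ih _ _ _ _ _ _ (by omega)

theorem walls_pvM2_le : walls pvM2 ≤ 529 := by
  have h0 : walls (List.replicate 23 (List.replicate 23 (1 : Int))) = 529 := by
    simp [walls]
  exact le_trans (walls_gset_le _ _ _) (le_trans (walls_gset_le _ _ _)
    (le_trans (walls_gset_le _ _ _) (le_trans (walls_gset_le _ _ _)
      (le_trans (walls_gset_le _ _ _) h0.le))))

theorem gen_final (M : List (List Int)) (v : Nat) (ds : List (Int × Int))
    (h : 5 * walls M + ds.length < 3000) :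
    loopA M v [((1 : Int), (1 : Int), ds)] = carveRun 3000 M v 1 1 ds := by
  unfold carveRun
  rw [carveB_fuel_bridge 3000 _ _ _ _ _ _ h]
  rw [loopA_nil]

theorem gen_chunk_eq (ws cx cy : Int) : gen_chunk ws cx cy = gen_chunk_alt ws cx cy := by
  have hh : 5 * walls pvM2 + (sd (cseedL ws cx cy)).1.length < 3000 := by
    have := walls_pvM2_le
    rw [sd_len]
    omega
  exact gen_final pvM2 (sd (cseedL ws cx cy)).2 (sd (cseedL ws cx cy)).1 hh

-- ===== VERDICT (by name: the statement is the Claim_ definition above) =====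
theorem gen_chunk_spec : Claim_equal_gen_chunk := by
  intro ws cx cy _
  exact gen_chunk_eq ws cx cy
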